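/- GENERATED by farm/mkstatement.py from design/units.tsv (unit `GifMakeMapObject.COMPOSITION`) and the Specs of Gif/Spec/*.lean — do not edit.
   THE STATEMENT of the proof unit `GifMakeMapObject.COMPOSITION`: the function `GifMakeMapObject` (61 instructions) satisfies its contract,
   GIVEN THE STATEMENTS OF ITS 3 SEGMENTS (`Gif.Spec.GifMakeMapObject.Seg<k> Lay μ u₀`: what the unit `GifMakeMapObject.<k>` proves).
   No machine code is walked: `ReachVia.trans` along the segments (the exit assertion of a segment is the entry assertion of
   its successor), an induction on the loop measures. What the names mean: ProgX/Base/Spec/Basic.lean. The theorem to prove: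
   `theorem GifMakeMapObject_COMPOSITION_ok : Gif.Spec.GifMakeMapObject_COMPOSITION.Statement`. -/
import Gif.Code
import Gif.Dec.All
import Gif.Labels
import Gif.Spec.Alloc
import Gif.Spec.Seg_GifMakeMapObject
namespace Gif.Spec.GifMakeMapObject_COMPOSITION
open X86 X86.User Asan

/-- The statement of unit `GifMakeMapObject.COMPOSITION`. -/
def Statement : Prop :=
  ∀ (Lay : Layout) (_hLay : Lay.hi = 0x1000000) (μ : Microarch) (_hμ : UserX.MicroOK μ) (u₀ : State)
    (_h_GifMakeMapObject_1 : Gif.Spec.GifMakeMapObject.Seg1 Lay μ u₀)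
    (_h_GifMakeMapObject_2 : Gif.Spec.GifMakeMapObject.Seg2 Lay μ u₀)
    (_h_GifMakeMapObject_E : Gif.Spec.GifMakeMapObject.SegE Lay μ u₀),
    ∀ (H : Heap) (rest : List Obj) (frames : List (Nat × FrameLayout)) (count : Nat), Calls Lay μ ProgX.Base.WayInv (ProgX.Base.conv u₀) Gif.L.GifMakeMapObject.entry (Gif.Spec.GifMakeMapObject.spec H rest frames count)

end Gif.Spec.GifMakeMapObject_COMPOSITION
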